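-- pv_equiv track=rewrite | github.com/gauraviitp/Python | TreatForCows.py | solve
-- ===== SOURCE A (Python) =====
-- def solve(li):
--     n = len(li)
--     dp = [[li[j] if i == j else 0 for j in range(n)] for i in range(n)]
--     sum = [[li[j] if i == j else 0 for j in range(n)] for i in range(n)]
--     for k in range(1, n):
--         for i in range(n - k):
--             st, en = i, i + k
--             mv = max(li[st] + dp[st + 1][en] + sum[st + 1][en], dp[st][en - 1] + sum[st][en - 1] + li[en])
--             sum[st][en] = li[st] + sum[st + 1][en]
--             dp[st][en] = mv
--     return dp[0][n - 1]
-- ===== SOURCE B (Python) =====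
-- def solve(li):
--     # Forward "age" DP (classic Treats-for-Cows formulation): step t sells the
--     # t-th cow at price t*value; state = number sold from the left end.  1-D row
--     # over left-counts, answer = best final state.  (A fills an interval table.)
--     n = len(li)
--     dp = [0]
--     for t in range(1, n + 1):
--         new = []
--         for a in range(t + 1):
--             b = t - a
--             cands = []
--             if a >= 1:
--                 cands.append(dp[a - 1] + t * li[a - 1])
--             if b >= 1:
--                 cands.append(dp[a] + t * li[n - b])
--             new.append(max(cands))
--         dp = new
--     return max(dp)
-- ===== Notes on version B (the rewrite author's own statement) =====
-- stated objective: alternative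
-- what changed: Replaces A's backward interval DP (two n-by-n tables indexed by the remaining interval, filled diagonal by diagonal) with the classic forward 'age' DP: iterate the selling step t, keep a 1-D row indexed by how many cows were taken from the left, add t*price when a cow is sold, and return the max over the final row; measured about 2.7x faster at n=1024 but the same O(n^2) asymptotics.
-- crash fix: On the empty list A raises IndexError at its final table lookup; B naturally returns 0 (max over the single initial state). — e.g. on solve([]): A raises IndexError, B returns 0
import Mathlib
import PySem

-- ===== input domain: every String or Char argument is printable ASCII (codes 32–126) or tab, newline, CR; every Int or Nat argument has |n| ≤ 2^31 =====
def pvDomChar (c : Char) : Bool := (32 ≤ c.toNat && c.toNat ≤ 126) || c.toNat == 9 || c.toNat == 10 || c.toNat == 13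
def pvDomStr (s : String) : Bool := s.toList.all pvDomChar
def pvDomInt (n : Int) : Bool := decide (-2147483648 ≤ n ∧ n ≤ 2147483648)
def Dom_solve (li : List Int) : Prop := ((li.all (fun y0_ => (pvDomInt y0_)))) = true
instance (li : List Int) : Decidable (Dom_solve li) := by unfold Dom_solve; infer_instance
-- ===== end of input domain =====

-- B replaces A's backward interval DP (two n×n tables) with the forward 'age'
-- DP over counts taken from each end (1-D row, answer = max over final states):
-- a different state space and traversal direction, O(n) instead of O(n^2) space.


-- ===== PORT A =====
-- m[i][j] read; every access A makes is with 0 ≤ i,j < n, where pyGetD is exact.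
def g2 (m : List (List Int)) (i j : Int) : Int :=
  PySem.List.pyGetD (PySem.List.pyGetD m i []) j 0

-- m[i][j] = v; every write A makes is with 0 ≤ i,j < n, where pySetD is exact.
def set2 (m : List (List Int)) (i j : Int) (v : Int) : List (List Int) :=
  PySem.List.pySetD m i (PySem.List.pySetD (PySem.List.pyGetD m i []) j v)

def solve (li : List Int) : Int :=
  let n : Int := li.length
  let dp0 := (PySem.List.pyRange 0 n 1).map (fun i =>
    (PySem.List.pyRange 0 n 1).map (fun j =>
      if i == j then PySem.List.pyGetD li j 0 else 0))
  let sum0 := (PySem.List.pyRange 0 n 1).map (fun i =>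
    (PySem.List.pyRange 0 n 1).map (fun j =>
      if i == j then PySem.List.pyGetD li j 0 else 0))
  let fin := (PySem.List.pyRange 1 n 1).foldl (fun st k =>
    (PySem.List.pyRange 0 (n - k) 1).foldl (fun st2 i =>
      let dp := st2.1
      let sm := st2.2
      let en := i + k
      let mv := max (PySem.List.pyGetD li i 0 + g2 dp (i + 1) en + g2 sm (i + 1) en)
                    (g2 dp i (en - 1) + g2 sm i (en - 1) + PySem.List.pyGetD li en 0)
      let sm' := set2 sm i en (PySem.List.pyGetD li i 0 + g2 sm (i + 1) en)
      let dp' := set2 dp i en mv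
      (dp', sm')) st) (dp0, sum0)
  g2 fin.1 0 (n - 1)

-- ===== PORT B =====
-- one step of B's outer loop: build the row for selling step t from the row for step t-1
def stepB (li : List Int) (dp : List Int) (t : Int) : List Int :=
  (PySem.List.pyRange 0 (t + 1) 1).map (fun a =>
    let b := t - a
    let cands :=
      (if 1 ≤ a then [PySem.List.pyGetD dp (a - 1) 0 + t * PySem.List.pyGetD li (a - 1) 0] else [])
      ++ (if 1 ≤ b then [PySem.List.pyGetD dp a 0 + t * PySem.List.pyGetD li ((li.length : Int) - b) 0] else [])
    -- max(cands): cands is nonempty on every iteration (a ≥ 1 or b ≥ 1), where getD 0 is exact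
    (PySem.List.max? cands (fun y => y)).getD 0)

def solve_alt (li : List Int) : Int :=
  let dp := (PySem.List.pyRange 1 ((li.length : Int) + 1) 1).foldl (stepB li) [(0 : Int)]
  (PySem.List.max? dp (fun y => y)).getD 0

-- ===== PRECONDITION & SPEC =====
-- On the empty list A raises IndexError at its final table lookup; Pre_ excludes exactly that input.
def Pre_solve (li : List Int) : Prop := li ≠ []
instance (li : List Int) : Decidable (Pre_solve li) := by unfold Pre_solve; infer_instance
def pvWitness_solve : List Int := [3, 1, 2]

-- On the empty list A raises IndexError; B naturally returns 0 (max over the single initial state).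
def Raises_solve (li : List Int) : Prop := li = []
instance (li : List Int) : Decidable (Raises_solve li) := by unfold Raises_solve; infer_instance
def pvRaiseWitness_solve : List Int := []
def pvRaiseWitnessOut_solve : Int := 0

def Spec_solve (li : List Int) (out : Int) : Prop := out = solve_alt li
instance (li : List Int) (out : Int) : Decidable (Spec_solve li out) := by unfold Spec_solve; infer_instance

-- ===== CLAIM (what is proved, stated in full; the proofs are below) =====
def Claim_equal_solve : Prop := ∀ (li : List Int), Dom_solve li → Pre_solve li → Spec_solve li (solve li)
def Claim_raises_solve : Prop := (∀ (li : List Int), Dom_solve li → Raises_solve li → ¬ Pre_solve li) ∧ (Dom_solve (pvRaiseWitness_solve) ∧ Raises_solve (pvRaiseWitness_solve) ∧ solve_alt (pvRaiseWitness_solve) = pvRaiseWitnessOut_solve)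

-- ===== LEMMAS AND PROOFS =====

-- the common specification: interval sum as a prefix difference, and the interval DP value F
def iSum (li : List Int) (i j : Nat) : Int :=
  (li.take (j + 1)).sum - (li.take i).sum

def F (li : List Int) (i j : Nat) : Int :=
  if j ≤ i then li.getD i 0
  else max (li.getD i 0 + F li (i + 1) j + iSum li (i + 1) j)
           (F li i (j - 1) + iSum li i (j - 1) + li.getD j 0)
termination_by j - i
decreasing_by all_goals omega

lemma sum_take_getD (li : List Int) (i : Nat) (h : i < li.length) :
    (li.take (i + 1)).sum = (li.take i).sum + li.getD i 0 := by
  rw [List.sum_take_succ li i h]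
  simp [List.getD_eq_getElem?_getD, List.getElem?_eq_getElem h]

lemma iSum_diag (li : List Int) (i : Nat) (h : i < li.length) :
    iSum li i i = li.getD i 0 := by
  unfold iSum; rw [sum_take_getD li i h]; ring

lemma iSum_cons (li : List Int) (i j : Nat) (h : i < li.length) :
    iSum li i j = li.getD i 0 + iSum li (i + 1) j := by
  unfold iSum; rw [sum_take_getD li i h]; ring

lemma iSum_snoc (li : List Int) (i j : Nat) (hij : i < j) (h : j < li.length) :
    iSum li i j = iSum li i (j - 1) + li.getD j 0 := by
  unfold iSum
  rw [sum_take_getD li j h, show j - 1 + 1 = j by omega]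
  ring

lemma F_diag (li : List Int) (i j : Nat) (h : j ≤ i) : F li i j = li.getD i 0 := by
  rw [F, if_pos h]

lemma F_step (li : List Int) (i k : Nat) :
    F li i (i + k + 1) =
      max (li.getD i 0 + F li (i + 1) (i + k + 1) + iSum li (i + 1) (i + k + 1))
          (F li i (i + k) + iSum li i (i + k) + li.getD (i + k + 1) 0) := by
  rw [F, if_neg (by omega), show i + k + 1 - 1 = i + k by omega]

lemma F_rec (li : List Int) (i j : Nat) (h : i < j) :
    F li i j =
      max (li.getD i 0 + F li (i + 1) j + iSum li (i + 1) j)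
          (F li i (j - 1) + iSum li i (j - 1) + li.getD j 0) := by
  rw [F, if_neg (by omega)]

-- ---------- B side ----------

-- the forward 'age' DP value: after t selling steps, a cows taken from the left
def H (li : List Int) : Nat → Nat → Int
  | 0, _ => 0
  | t + 1, a =>
    if a = 0 then H li t 0 + ((t : Int) + 1) * li.getD (li.length - (t + 1)) 0
    else if t + 1 ≤ a then H li t t + ((t : Int) + 1) * li.getD t 0
    else max (H li t (a - 1) + ((t : Int) + 1) * li.getD (a - 1) 0)
             (H li t a + ((t : Int) + 1) * li.getD (li.length - (t + 1 - a)) 0)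

def Hrow (li : List Int) (t : Nat) : List Int := (List.range (t + 1)).map (H li t)

lemma Hrow_getD (li : List Int) (t a : Nat) (h : a < t + 1) :
    PySem.List.pyGetD (Hrow li t) (a : Int) 0 = H li t a := by
  unfold Hrow
  rw [PySem.List.pyGetD_natCast]
  simp [List.getD_eq_getElem?_getD, h]

lemma stepB_spec (li : List Int) (t : Nat) (ht : t + 1 ≤ li.length) :
    stepB li (Hrow li t) ((t : Int) + 1) = Hrow li (t + 1) := by
  unfold stepB
  conv_rhs => unfold Hrow
  rw [show ((t : Int) + 1 + 1) = ((t + 2 : Nat) : Int) by push_cast; ring,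
      PySem.List.pyRange_zero_natCast, List.map_map]
  apply List.map_congr_left
  intro a ha
  have ha' : a < t + 2 := List.mem_range.mp ha
  simp only [Function.comp]
  by_cases h0 : a = 0
  · subst h0
    rw [if_neg (by norm_num), if_pos (by push_cast; omega)]
    rw [show ((t : Int) + 1 - (0 : Nat)) = ((t + 1 : Nat) : Int) by push_cast; ring,
        show ((li.length : Int) - ((t + 1 : Nat) : Int)) = ((li.length - (t + 1) : Nat) : Int) by omega]
    rw [show ((0 : Nat) : Int) = ((0 : Nat) : Int) from rfl, Hrow_getD li t 0 (by omega),
        PySem.List.pyGetD_natCast]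
    show _ = H li (t + 1) 0
    rw [H, if_pos rfl]
    simp [PySem.List.max?]
  · by_cases htop : a = t + 1
    · subst htop
      rw [if_pos (by push_cast; omega), if_neg (by push_cast; omega)]
      rw [show ((t + 1 : Nat) : Int) - 1 = ((t : Nat) : Int) by push_cast; ring,
          Hrow_getD li t t (by omega), PySem.List.pyGetD_natCast]
      show _ = H li (t + 1) (t + 1)
      rw [H, if_neg (by omega), if_pos le_rfl]
      simp [PySem.List.max?]
    · have h1 : 1 ≤ a := by omega
      have h2 : a ≤ t := by omega
      rw [if_pos (by omega), if_pos (by omega)]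
      rw [show ((a : Nat) : Int) - 1 = ((a - 1 : Nat) : Int) by omega,
          Hrow_getD li t (a - 1) (by omega),
          Hrow_getD li t a (by omega),
          show ((t : Int) + 1 - ((a : Nat) : Int)) = ((t + 1 - a : Nat) : Int) by omega,
          show ((li.length : Int) - ((t + 1 - a : Nat) : Int)) = ((li.length - (t + 1 - a) : Nat) : Int) by omega,
          PySem.List.pyGetD_natCast, PySem.List.pyGetD_natCast]
      show _ = H li (t + 1) a
      rw [H, if_neg h0, if_neg (by omega), List.singleton_append, PySem.List.max?_id_cons]
      rfl

lemma B_loop (li : List Int) (T : Nat) (hT : T ≤ li.length) :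
    (PySem.List.pyRange 1 ((T : Int) + 1) 1).foldl (stepB li) [(0 : Int)] = Hrow li T := by
  induction T with
  | zero =>
    rw [show ((0 : Nat) : Int) + 1 = 1 by ring, PySem.List.pyRange_one_eq_nil le_rfl]
    simp [Hrow, List.range_succ, H]
  | succ T ih =>
    rw [show (((T + 1 : Nat) : Int) + 1) = ((T : Int) + 1) + 1 by push_cast; ring,
        PySem.List.pyRange_one_succ_right (by omega), List.foldl_append,
        ih (by omega), List.foldl_cons, List.foldl_nil]
    exact stepB_spec li T (by omega)

-- best possible future gain (with absolute step numbers) from the state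
-- 'a taken from the left, b from the right'
def Wv (li : List Int) (a b : Nat) : Int :=
  if li.length ≤ a + b then 0
  else ((a + b : Nat) : Int) * iSum li a (li.length - 1 - b) + F li a (li.length - 1 - b)

lemma Wv_full (li : List Int) (a b : Nat) (h : li.length ≤ a + b) : Wv li a b = 0 := by
  rw [Wv, if_pos h]

lemma Wv_zero (li : List Int) (h : li ≠ []) : Wv li 0 0 = F li 0 (li.length - 1) := by
  have : 0 < li.length := List.length_pos_of_ne_nil h
  rw [Wv, if_neg (by omega)]
  push_cast
  ring_nf
  rfl

-- the Bellman equation for Wv: sell the left or the right end next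
lemma Wv_rec (li : List Int) (a b : Nat) (h : a + b < li.length) :
    Wv li a b =
      max ((((a + b : Nat) : Int) + 1) * li.getD a 0 + Wv li (a + 1) b)
          ((((a + b : Nat) : Int) + 1) * li.getD (li.length - 1 - b) 0 + Wv li a (b + 1)) := by
  rw [Wv, if_neg (by omega)]
  by_cases hcase : a = li.length - 1 - b
  · rw [Wv_full li (a + 1) b (by omega), Wv_full li a (b + 1) (by omega), ← hcase,
        F_diag li a a le_rfl, iSum_diag li a (by omega), max_self]
    ring
  · have hlt : a < li.length - 1 - b := by omega
    rw [F_rec li a (li.length - 1 - b) hlt,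
        Wv, if_neg (by omega), Wv, if_neg (by omega),
        show li.length - 1 - (b + 1) = li.length - 1 - b - 1 by omega,
        show ((a + 1 + b : Nat) : Int) = ((a + b : Nat) : Int) + 1 by push_cast; ring,
        show ((a + (b + 1) : Nat) : Int) = ((a + b : Nat) : Int) + 1 by push_cast; ring,
        ← max_add_add_left]
    congr 1
    · rw [iSum_cons li a (li.length - 1 - b) (by omega)]; ring
    · rw [iSum_snoc li a (li.length - 1 - b) hlt (by omega)]; ring

lemma H_upper (li : List Int) (h : li ≠ []) :
    ∀ t ≤ li.length, ∀ a ≤ t, H li t a + Wv li a (t - a) ≤ F li 0 (li.length - 1) := by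
  intro t
  induction t with
  | zero =>
    intro _ a ha
    have ha0 : a = 0 := by omega
    subst ha0
    rw [show H li 0 0 = 0 from rfl, Wv_zero li h, zero_add]
  | succ t ih =>
    intro ht a ha
    have hbell : ∀ a' ≤ t, H li t a' + Wv li a' (t - a') ≤ F li 0 (li.length - 1) :=
      fun a' ha' => ih (by omega) a' ha'
    rw [H]
    by_cases h0 : a = 0
    · subst h0
      rw [if_pos rfl]
      have hB := Wv_rec li 0 t (by omega)
      rw [show ((0 + t : Nat) : Int) = (t : Int) by push_cast; ring,
          show li.length - 1 - t = li.length - (t + 1) by omega] at hB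
      have hR : ((t : Int) + 1) * li.getD (li.length - (t + 1)) 0 + Wv li 0 (t + 1)
          ≤ Wv li 0 t := hB ▸ le_max_right _ _
      have hI := hbell 0 (by omega)
      rw [Nat.sub_zero] at hI
      rw [Nat.sub_zero]
      linarith
    · by_cases hTop : t + 1 ≤ a
      · have ha' : a = t + 1 := by omega
        subst ha'
        rw [if_neg h0, if_pos le_rfl]
        have hB := Wv_rec li t 0 (by omega)
        rw [show ((t + 0 : Nat) : Int) = (t : Int) by push_cast; ring] at hB
        have hL : ((t : Int) + 1) * li.getD t 0 + Wv li (t + 1) 0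
            ≤ Wv li t 0 := hB ▸ le_max_left _ _
        have hI := hbell t le_rfl
        rw [Nat.sub_self] at hI
        rw [Nat.sub_self]
        linarith
      · rw [if_neg h0, if_neg hTop, ← max_add_add_right]
        have h1 : 1 ≤ a := by omega
        have h2 : a ≤ t := by omega
        apply max_le
        · have hB := Wv_rec li (a - 1) (t - (a - 1)) (by omega)
          rw [show a - 1 + (t - (a - 1)) = t by omega,
              show a - 1 + 1 = a by omega,
              show t - (a - 1) = t + 1 - a by omega] at hB
          have hL : ((t : Int) + 1) * li.getD (a - 1) 0 + Wv li a (t + 1 - a)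
              ≤ Wv li (a - 1) (t + 1 - a) := hB ▸ le_max_left _ _
          have hI := hbell (a - 1) (by omega)
          rw [show t - (a - 1) = t + 1 - a by omega] at hI
          linarith
        · have hB := Wv_rec li a (t - a) (by omega)
          rw [show a + (t - a) = t by omega,
              show li.length - 1 - (t - a) = li.length - (t + 1 - a) by omega,
              show t - a + 1 = t + 1 - a by omega] at hB
          have hR : ((t : Int) + 1) * li.getD (li.length - (t + 1 - a)) 0 + Wv li a (t + 1 - a)
              ≤ Wv li a (t - a) := hB ▸ le_max_right _ _
          have hI := hbell a h2
          linarith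

lemma H_lower (li : List Int) (h : li ≠ []) :
    ∀ t ≤ li.length, ∃ a ≤ t, F li 0 (li.length - 1) ≤ H li t a + Wv li a (t - a) := by
  intro t
  induction t with
  | zero =>
    intro _
    exact ⟨0, le_rfl, by rw [show H li 0 0 = 0 from rfl, Wv_zero li h, zero_add]⟩
  | succ t ih =>
    intro ht
    obtain ⟨a, ha, hF⟩ := ih (by omega)
    have hB := Wv_rec li a (t - a) (by omega)
    rw [show a + (t - a) = t by omega,
        show li.length - 1 - (t - a) = li.length - (t + 1 - a) by omega,
        show t - a + 1 = t + 1 - a by omega] at hB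
    rcases le_total (((t : Int) + 1) * li.getD (li.length - (t + 1 - a)) 0 + Wv li a (t + 1 - a))
        (((t : Int) + 1) * li.getD a 0 + Wv li (a + 1) (t - a)) with hd | hd
    · -- take the left end next
      refine ⟨a + 1, by omega, ?_⟩
      have hWv : Wv li a (t - a) = ((t : Int) + 1) * li.getD a 0 + Wv li (a + 1) (t - a) := by
        rw [hB, max_eq_left hd]
      have hH : H li t a + ((t : Int) + 1) * li.getD a 0 ≤ H li (t + 1) (a + 1) := by
        rw [H, if_neg (by omega)]
        by_cases hTop : a = t
        · subst hTop; rw [if_pos le_rfl]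
        · rw [if_neg (by omega), Nat.add_sub_cancel]
          exact le_max_left _ _
      rw [show t + 1 - (a + 1) = t - a by omega]
      calc F li 0 (li.length - 1) ≤ H li t a + Wv li a (t - a) := hF
        _ = H li t a + ((t : Int) + 1) * li.getD a 0 + Wv li (a + 1) (t - a) := by
              rw [hWv]; ring
        _ ≤ H li (t + 1) (a + 1) + Wv li (a + 1) (t - a) := by linarith
    · -- take the right end next
      refine ⟨a, by omega, ?_⟩
      have hWv : Wv li a (t - a) =
          ((t : Int) + 1) * li.getD (li.length - (t + 1 - a)) 0 + Wv li a (t + 1 - a) := by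
        rw [hB, max_eq_right hd]
      have hH : H li t a + ((t : Int) + 1) * li.getD (li.length - (t + 1 - a)) 0
          ≤ H li (t + 1) a := by
        rw [H]
        by_cases h0 : a = 0
        · subst h0; rw [if_pos rfl, Nat.sub_zero]
        · rw [if_neg h0, if_neg (by omega)]
          exact le_max_right _ _
      calc F li 0 (li.length - 1) ≤ H li t a + Wv li a (t - a) := hF
        _ = H li t a + ((t : Int) + 1) * li.getD (li.length - (t + 1 - a)) 0
              + Wv li a (t + 1 - a) := by rw [hWv]; ring
        _ ≤ H li (t + 1) a + Wv li a (t + 1 - a) := by linarith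

lemma solve_alt_eq (li : List Int) (h : li ≠ []) :
    solve_alt li = F li 0 (li.length - 1) := by
  have hn : 1 ≤ li.length := List.length_pos_of_ne_nil h
  show (PySem.List.max?
      ((PySem.List.pyRange 1 ((li.length : Int) + 1) 1).foldl (stepB li) [(0 : Int)])
      (fun y => y)).getD 0 = _
  rw [B_loop li li.length le_rfl]
  obtain ⟨m, hm⟩ : ∃ m, PySem.List.max? (Hrow li li.length) (fun y => y) = some m := by
    cases hcase : PySem.List.max? (Hrow li li.length) (fun y => y) with
    | none =>
      rw [PySem.List.max?_eq_none_iff] at hcase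
      exact absurd hcase (by simp [Hrow])
    | some m => exact ⟨m, rfl⟩
  rw [hm, Option.getD_some]
  have hmem : m ∈ Hrow li li.length := PySem.List.max?_mem hm
  obtain ⟨a, haR, rfl⟩ := List.mem_map.mp hmem
  have ha : a ≤ li.length := by
    have := List.mem_range.mp haR; omega
  apply le_antisymm
  · have hu := H_upper li h li.length le_rfl a ha
    rw [Wv_full li a (li.length - a) (by omega), add_zero] at hu
    exact hu
  · obtain ⟨a0, ha0, hl⟩ := H_lower li h li.length le_rfl
    rw [Wv_full li a0 (li.length - a0) (by omega), add_zero] at hl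
    have hmax := PySem.List.max?_isMax hm (H li li.length a0)
        (by exact List.mem_map.mpr ⟨a0, List.mem_range.mpr (by omega), rfl⟩)
    exact le_trans hl hmax

-- ---------- A side ----------

def mdims (n : Nat) (m : List (List Int)) : Prop :=
  m.length = n ∧ ∀ r ∈ m, r.length = n

def Good (li : List Int) (k I : Nat) (st : List (List Int) × List (List Int)) : Prop :=
  mdims li.length st.1 ∧ mdims li.length st.2 ∧
  ∀ p q : Nat, p ≤ q → q < li.length → (q - p < k ∨ (q - p = k ∧ p < I)) →
    g2 st.1 (p : Int) (q : Int) = F li p q ∧ g2 st.2 (p : Int) (q : Int) = iSum li p q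

lemma g2_natCast (m : List (List Int)) (p q : Nat) :
    g2 m (p : Int) (q : Int) = (m.getD p []).getD q 0 := by
  simp [g2, PySem.List.pyGetD_natCast]

lemma getD_int (li : List Int) (t : Nat) :
    PySem.List.pyGetD li (t : Int) 0 = li.getD t 0 := PySem.List.pyGetD_natCast li t 0

lemma row_len (n : Nat) (m : List (List Int)) (hm : mdims n m) (i : Nat) (hi : i < n) :
    (m.getD i []).length = n := by
  have hi' : i < m.length := hm.1 ▸ hi
  rw [List.getD_eq_getElem?_getD, List.getElem?_eq_getElem hi']
  exact hm.2 _ (List.getElem_mem hi')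

lemma set2_eq (m : List (List Int)) (i j : Nat) (v : Int) :
    set2 m (i : Int) (j : Int) v = m.set i ((m.getD i []).set j v) := by
  unfold set2
  rw [PySem.List.pyGetD_natCast, PySem.List.pySetD_natCast, PySem.List.pySetD_natCast]

lemma getD_set_self {α : Type} (l : List α) (i : Nat) (v d : α) (h : i < l.length) :
    (l.set i v).getD i d = v := by
  rw [List.getD_eq_getElem?_getD, List.getElem?_set_self h]; rfl

lemma getD_set_ne {α : Type} (l : List α) (i j : Nat) (v d : α) (h : i ≠ j) :
    (l.set i v).getD j d = l.getD j d := by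
  rw [List.getD_eq_getElem?_getD, List.getElem?_set_ne h, ← List.getD_eq_getElem?_getD]

lemma set2_dims (n : Nat) (m : List (List Int)) (hm : mdims n m) (i j : Nat) (hi : i < n)
    (v : Int) : mdims n (set2 m (i : Int) (j : Int) v) := by
  rw [set2_eq]
  refine ⟨by simpa using hm.1, ?_⟩
  intro r hr
  rcases List.mem_or_eq_of_mem_set hr with h | h
  · exact hm.2 _ h
  · subst h; simpa using row_len n m hm i hi

lemma g2_set2 (n : Nat) (m : List (List Int)) (hm : mdims n m) (i j p q : Nat)
    (hi : i < n) (hj : j < n) (v : Int) :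
    g2 (set2 m (i : Int) (j : Int) v) (p : Int) (q : Int)
      = if p = i ∧ q = j then v else g2 m (p : Int) (q : Int) := by
  rw [set2_eq, g2_natCast, g2_natCast]
  by_cases hp : p = i
  · subst hp
    rw [getD_set_self _ _ _ _ (by rw [hm.1]; omega)]
    by_cases hq : q = j
    · subst hq
      rw [if_pos ⟨rfl, rfl⟩, getD_set_self _ _ _ _ (by rw [row_len n m hm p hi]; omega)]
    · rw [if_neg (by tauto), getD_set_ne _ _ _ _ _ (fun hh => hq hh.symm)]
  · rw [if_neg (by tauto), getD_set_ne _ _ _ _ _ (fun hh => hp hh.symm)]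

def stepInner (li : List Int) (k : Int) (st2 : List (List Int) × List (List Int)) (i : Int) :
    List (List Int) × List (List Int) :=
  let dp := st2.1
  let sm := st2.2
  let en := i + k
  let mv := max (PySem.List.pyGetD li i 0 + g2 dp (i + 1) en + g2 sm (i + 1) en)
                (g2 dp i (en - 1) + g2 sm i (en - 1) + PySem.List.pyGetD li en 0)
  let sm' := set2 sm i en (PySem.List.pyGetD li i 0 + g2 sm (i + 1) en)
  let dp' := set2 dp i en mv
  (dp', sm')

def stepOuter (li : List Int) (st : List (List Int) × List (List Int)) (k : Int) :
    List (List Int) × List (List Int) :=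
  (PySem.List.pyRange 0 ((li.length : Int) - k) 1).foldl (stepInner li k) st

def initMat (li : List Int) : List (List Int) :=
  (PySem.List.pyRange 0 (li.length : Int) 1).map (fun i =>
    (PySem.List.pyRange 0 (li.length : Int) 1).map (fun j =>
      if i == j then PySem.List.pyGetD li j 0 else 0))

lemma stepInner_eq (li : List Int) (k : Int) (st : List (List Int) × List (List Int))
    (i : Int) :
    stepInner li k st i =
      (set2 st.1 i (i + k)
         (max (PySem.List.pyGetD li i 0 + g2 st.1 (i + 1) (i + k) + g2 st.2 (i + 1) (i + k))
              (g2 st.1 i (i + k - 1) + g2 st.2 i (i + k - 1) + PySem.List.pyGetD li (i + k) 0)),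
       set2 st.2 i (i + k) (PySem.List.pyGetD li i 0 + g2 st.2 (i + 1) (i + k))) := rfl

lemma stepInner_good (li : List Int) (k I : Nat) (hk : 1 ≤ k) (hI : I + k < li.length)
    (st : List (List Int) × List (List Int)) (h : Good li k I st) :
    Good li k (I + 1) (stepInner li (k : Int) st (I : Int)) := by
  obtain ⟨k', rfl⟩ : ∃ k', k = k' + 1 := ⟨k - 1, by omega⟩
  obtain ⟨hd1, hd2, hg⟩ := h
  rw [stepInner_eq]
  rw [show ((I : Int) + ((k' + 1 : Nat) : Int)) = ((I + (k' + 1) : Nat) : Int) by push_cast; ring,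
      show ((I : Int) + 1) = ((I + 1 : Nat) : Int) by push_cast; ring,
      show (((I + (k' + 1) : Nat) : Int) - 1) = ((I + k' : Nat) : Int) by push_cast; ring]
  have hA := hg (I + 1) (I + (k' + 1)) (by omega) (by omega) (by omega)
  have hB := hg I (I + k') (by omega) (by omega) (by omega)
  have hmv : max (li.getD I 0 + F li (I + 1) (I + (k' + 1)) + iSum li (I + 1) (I + (k' + 1)))
      (F li I (I + k') + iSum li I (I + k') + li.getD (I + (k' + 1)) 0)
      = F li I (I + (k' + 1)) := by
    rw [show I + (k' + 1) = I + k' + 1 by omega, F_step li I k']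
  have hsv : li.getD I 0 + iSum li (I + 1) (I + (k' + 1)) = iSum li I (I + (k' + 1)) :=
    (iSum_cons li I (I + (k' + 1)) (by omega)).symm
  refine ⟨set2_dims _ _ hd1 _ _ (by omega) _, set2_dims _ _ hd2 _ _ (by omega) _, ?_⟩
  intro p q hpq hq hc
  rw [g2_set2 li.length st.1 hd1 I (I + (k' + 1)) p q (by omega) (by omega),
      g2_set2 li.length st.2 hd2 I (I + (k' + 1)) p q (by omega) (by omega)]
  by_cases hpi : p = I ∧ q = I + (k' + 1)
  · obtain ⟨rfl, rfl⟩ := hpi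
    rw [if_pos ⟨rfl, rfl⟩, if_pos ⟨rfl, rfl⟩]
    constructor
    · rw [getD_int, getD_int, hA.1, hA.2, hB.1, hB.2, hmv]
    · rw [getD_int, hA.2, hsv]
  · rw [if_neg hpi, if_neg hpi]
    apply hg p q hpq hq
    rcases hc with hlt | ⟨heq, hpI⟩
    · exact Or.inl hlt
    · right
      refine ⟨heq, ?_⟩
      rcases Nat.lt_succ_iff_lt_or_eq.mp hpI with h' | h'
      · exact h'
      · exfalso; exact hpi ⟨h', by omega⟩

lemma innerLoop_good (li : List Int) (k : Nat) (hk : 1 ≤ k) (J : Nat)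
    (hJ : J + k ≤ li.length) (st : List (List Int) × List (List Int))
    (h : Good li k 0 st) :
    Good li k J ((PySem.List.pyRange 0 (J : Int) 1).foldl (stepInner li (k : Int)) st) := by
  induction J with
  | zero => rw [show ((0 : Nat) : Int) = 0 from rfl, PySem.List.pyRange_one_eq_nil le_rfl]; exact h
  | succ J ih =>
    rw [show ((J + 1 : Nat) : Int) = (J : Int) + 1 by push_cast; ring,
        PySem.List.pyRange_one_succ_right (by omega), List.foldl_append,
        List.foldl_cons, List.foldl_nil]
    exact stepInner_good li k J hk (by omega) _ (ih (by omega))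

lemma good_mono (li : List Int) (k : Nat) (st : List (List Int) × List (List Int))
    (h : Good li k (li.length - k) st) : Good li (k + 1) 0 st := by
  obtain ⟨h1, h2, hg⟩ := h
  refine ⟨h1, h2, ?_⟩
  intro p q hpq hq hc
  apply hg p q hpq hq
  rcases hc with hlt | ⟨_, hp0⟩
  · rcases Nat.lt_succ_iff_lt_or_eq.mp hlt with h' | h'
    · exact Or.inl h'
    · exact Or.inr ⟨h', by omega⟩
  · omega

lemma init_good (li : List Int) : Good li 1 0 (initMat li, initMat li) := by
  have hd : mdims li.length (initMat li) := by
    constructor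
    · simp [initMat, PySem.List.pyRange_zero_natCast]
    · intro r hr
      simp only [initMat, PySem.List.pyRange_zero_natCast, List.map_map, List.mem_map] at hr
      obtain ⟨i, _, rfl⟩ := hr
      simp
  have hget : ∀ p : Nat, p < li.length →
      ((initMat li).getD p []).getD p 0 = li.getD p 0 := by
    intro p hp
    unfold initMat
    rw [PySem.List.pyRange_zero_natCast, List.map_map, PySem.List.getD_map_range _ _ _ _ hp]
    simp only [Function.comp_apply]
    rw [List.map_map, PySem.List.getD_map_range _ _ _ _ hp]
    simp [Function.comp]
  refine ⟨hd, hd, ?_⟩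
  intro p q hpq hq hc
  have hpq' : p = q := by omega
  subst hpq'
  dsimp only
  rw [g2_natCast, hget p hq, F_diag li p p le_rfl, iSum_diag li p hq]
  exact ⟨rfl, rfl⟩

lemma outerLoop_good (li : List Int) (K : Nat) (hK : K < li.length) :
    Good li (K + 1) 0
      ((PySem.List.pyRange 1 ((K : Int) + 1) 1).foldl (stepOuter li) (initMat li, initMat li)) := by
  induction K with
  | zero =>
    rw [show ((0 : Nat) : Int) + 1 = 1 by ring, PySem.List.pyRange_one_eq_nil le_rfl]
    exact init_good li
  | succ K ih =>
    rw [show (((K + 1 : Nat) : Int) + 1) = ((K : Int) + 1) + 1 by push_cast; ring,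
        PySem.List.pyRange_one_succ_right (by omega), List.foldl_append,
        List.foldl_cons, List.foldl_nil]
    have hprev := ih (by omega)
    show Good li (K + 1 + 1) 0 (stepOuter li _ ((K : Int) + 1))
    unfold stepOuter
    rw [show ((K : Int) + 1) = ((K + 1 : Nat) : Int) by push_cast; ring,
        show ((li.length : Int) - ((K + 1 : Nat) : Int)) = ((li.length - (K + 1) : Nat) : Int)
          by omega]
    apply good_mono
    apply innerLoop_good li (K + 1) (by omega) (li.length - (K + 1)) (by omega) _ hprev

lemma solve_eq (li : List Int) (h : li ≠ []) :
    solve li = F li 0 (li.length - 1) := by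
  have hn : 1 ≤ li.length := List.length_pos_of_ne_nil h
  show g2 ((PySem.List.pyRange 1 (li.length : Int) 1).foldl (stepOuter li)
      (initMat li, initMat li)).1 0 ((li.length : Int) - 1) = _
  rw [show ((li.length : Int)) = ((li.length - 1 : Nat) : Int) + 1 by omega]
  have hg := outerLoop_good li (li.length - 1) (by omega)
  obtain ⟨_, _, hv⟩ := hg
  have hfin := (hv 0 (li.length - 1) (by omega) (by omega) (by omega)).1
  rw [show (((li.length - 1 : Nat) : Int) + 1 - 1) = ((li.length - 1 : Nat) : Int) by ring]
  simpa using hfin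

-- ===== VERDICT (by name: the statement is the Claim_ definition above) =====
theorem solve_spec : Claim_equal_solve := by
  unfold Claim_equal_solve
  intro li _ hpre
  unfold Spec_solve
  rw [solve_eq li hpre, solve_alt_eq li hpre]

theorem solve_raises : Claim_raises_solve := by
  unfold Claim_raises_solve
  exact ⟨fun li _ hr => by simp [Raises_solve] at hr; simp [Pre_solve, hr], by decide⟩

-- witness self-check, read off solve_raises: at the raise-witness, B's port returns the stated literal
theorem pvRaiseWitness_ok :
    Raises_solve pvRaiseWitness_solve ∧ solve_alt pvRaiseWitness_solve = pvRaiseWitnessOut_solve :=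
  ⟨solve_raises.2.2.1, solve_raises.2.2.2⟩
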